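/- GENERATED by mk_final_copies.py from the proof of the farm's unit `start_page_no_capturepattern` (farm:start_page_no_capturepattern.1: Lemmas.lean) as the
   re-elaboration sweep compiled it — do not edit. -/
import Asan.CheckWalk
import Vorbis.Spec.Units.start_page_no_capturepattern

/-!
  Lemmas of the unit `start_page_no_capturepattern`: the invariant carried between the cut points (`Frm`, `SpncMid`, `Exit`), the
  bundles of the statement's hypotheses (`SpncEnv`, `Ent`), and small pure facts. The segments themselves are in Proof.lean.
-/

open X86 X86.User Asan Vorbis Vorbis.Spec

set_option maxRecDepth 100000
set_option maxHeartbeats 4000000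

namespace Vorbis.Spec.start_page_no_capturepattern

/-- The join at `0x10c8ee` (stb_vorbis_fixed.c:1511 `if (f->first_decode)`): no label of Vorbis/Labels.lean names it. -/
abbrev join1 : Word := 0x10c8ee

/-- The join at `0x10c907` (stb_vorbis_fixed.c:1520 `f->next_seg = 0`). -/
abbrev join2 : Word := 0x10c907

/-- The exit join at `0x10c922` (stb_vorbis_fixed.c:1522 `}`: the five pops and the `ret`). -/
abbrev join3 : Word := 0x10c922

/-- **The static hypotheses of the statement**, bundled: the layout, the microarchitecture, the function's bytes, and the
contracts of the nine callees (the ghost parameters instantiated). -/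
structure SpncEnv (Lay : Layout) (μ : Microarch) (u₀ : State) (others : List Obj) (frames : List (Nat × FrameLayout))
    (Blk : Block → Prop) (len : Nat) : Prop where
  lay : Lay.hi = 0x1000000
  micro : UserX.MicroOK μ
  code : HasCodeNat Lay u₀ Vorbis.L.start_page_no_capturepattern.entry Vorbis.Code.code_start_page_no_capturepattern.nat
    Vorbis.L.start_page_no_capturepattern.size
  load1 : Asan.SmallCheck Lay μ Vorbis.WayInv (Vorbis.CodeOK u₀) [.rax, .rdx] 1 Vorbis.L.__asan_load1_noabort.entry
  gfo : Calls Lay μ Vorbis.WayInv (Vorbis.conv u₀) Vorbis.L.stb_vorbis_get_file_offset.entry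
    (Vorbis.Spec.stb_vorbis_get_file_offset.spec others frames)
  store4 : Asan.SmallCheck Lay μ Vorbis.WayInv (Vorbis.CodeOK u₀) [.rax, .rcx, .rdx] 4 Vorbis.L.__asan_store4_noabort.entry
  get8 : Calls Lay μ Vorbis.WayInv (Vorbis.conv u₀) Vorbis.L.get8.entry (Vorbis.Spec.get8.spec others frames Blk len)
  store1 : Asan.SmallCheck Lay μ Vorbis.WayInv (Vorbis.CodeOK u₀) [.rax, .rdx] 1 Vorbis.L.__asan_store1_noabort.entry
  get32 : Calls Lay μ Vorbis.WayInv (Vorbis.conv u₀) Vorbis.L.get32.entry (Vorbis.Spec.get32.spec others frames Blk len)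
  getn : Calls Lay μ Vorbis.WayInv (Vorbis.conv u₀) Vorbis.L.getn.entry (Vorbis.Spec.getn.spec others frames Blk len)
  load4 : Asan.SmallCheck Lay μ Vorbis.WayInv (Vorbis.CodeOK u₀) [.rax, .rcx, .rdx] 4 Vorbis.L.__asan_load4_noabort.entry
  error : Calls Lay μ Vorbis.WayInv (Vorbis.conv u₀) Vorbis.L.error.entry (Vorbis.Spec.error.spec others frames)

/-- **What is known of the entry state `u`** (from `AtEntry` and the precondition), bundled. -/
structure Ent (Lay : Layout) (others : List Obj) (frames : List (Nat × FrameLayout)) (Blk : Block → Prop) (len : Nat)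
    (u : State) (ret : Word) : Prop where
  ret_lt : ret < 1073741824
  align : (u.reg .rsp).toNat % 8 = 0
  room : 7340032 + 176 ≤ (u.reg .rsp).toNat
  top : (u.reg .rsp).toNat + 8 ≤ 8388608
  stack : Lay.Has (u.reg .rsp - 176) 184
  pre : ReaderPre others frames Blk len u
  boundary : AtPageBoundary u.mem (u.reg .rdi).toNat

/-- **The machine-level part of the invariant at every cut point after the five pushes**: rbx = f, the stack pointer, the
registers (r15 is never written), the code, the footprint so far, the shadow, the six stack slots, DF and MXCSR. -/
structure Frm (u₀ u s : State) (ret : Word) : Prop where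
  rbx : s.reg .rbx = u.reg .rdi
  rsp : s.reg .rsp = u.reg .rsp - 40
  kept : RegsKept [.rdi, .rbx, .rsp, .rax, .rdx, .rcx, .rsi, .r8, .r9, .r10, .r11, .r16, .r17, .r18, .r19, .r20, .r21,
    .r22, .r23, .r24, .r25, .r26, .r27, .r28, .r29, .r30, .r31, .rbp, .r12, .r13, .r14] u s
  code : Mem.EqOn Vorbis.L.textLo Vorbis.L.textHi u₀.mem s.mem
  same : Mem.SameExcept [⟨(u.reg .rsp).toNat - 176, (u.reg .rsp).toNat⟩,
    ⟨(u.reg .rdi).toNat + 48, (u.reg .rdi).toNat + 56⟩, ⟨(u.reg .rdi).toNat + 84, (u.reg .rdi).toNat + 96⟩,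
    ⟨(u.reg .rdi).toNat + 136, (u.reg .rdi).toNat + 144⟩, ⟨(u.reg .rdi).toNat + 1484, (u.reg .rdi).toNat + 1748⟩,
    ⟨(u.reg .rdi).toNat + 1752, (u.reg .rdi).toNat + 1756⟩, ⟨(u.reg .rdi).toNat + 1776, (u.reg .rdi).toNat + 1784⟩]
    u.mem s.mem
  untouched : ShadowUntouched u.mem s.mem
  slot0 : UInt64.ofNat (s.mem.readLE (u.reg .rsp) 8) = ret
  slot1 : UInt64.ofNat (s.mem.readLE (u.reg .rsp - 8) 8) = u.reg .r14
  slot2 : UInt64.ofNat (s.mem.readLE (u.reg .rsp - 16) 8) = u.reg .r13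
  slot3 : UInt64.ofNat (s.mem.readLE (u.reg .rsp - 24) 8) = u.reg .r12
  slot4 : UInt64.ofNat (s.mem.readLE (u.reg .rsp - 32) 8) = u.reg .rbp
  slot5 : UInt64.ofNat (s.mem.readLE (u.reg .rsp - 40) 8) = u.reg .rbx
  df : s.flags .df = false
  mx : s.mxcsr &&& 0x1F80 = 0x1F80

/-- **The invariant at the cut points up to the store of `next_seg`**: the machine-level part, `Bits f` in the current memory,
`next_seg` still what it was at the entry (so `∈ {−1, 0}`), `stream` not decreased. -/
structure SpncMid (Blk : Block → Prop) (len : Nat) (u₀ u s : State) (ret : Word) : Prop where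
  frm : Frm u₀ u s ret
  bits : Bits Blk len s.mem (u.reg .rdi).toNat
  ns : stb_vorbis.next_seg s.mem (u.reg .rdi).toNat = stb_vorbis.next_seg u.mem (u.reg .rdi).toNat
  st : stb_vorbis.stream u.mem (u.reg .rdi).toNat ≤ stb_vorbis.stream s.mem (u.reg .rdi).toNat

/-- **The invariant at the exit join `0x10c922`**: the machine-level part and what the postcondition says, about the memory
and `rax` of the state before the pops. -/
structure Exit (Blk : Block → Prop) (len : Nat) (u₀ u s : State) (ret : Word) : Prop where
  frm : Frm u₀ u s ret
  bits : Bits Blk len s.mem (u.reg .rdi).toNat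
  st : stb_vorbis.stream u.mem (u.reg .rdi).toNat ≤ stb_vorbis.stream s.mem (u.reg .rdi).toNat
  res : s.reg .rax = 0 ∨ s.reg .rax = 1
  started : s.reg .rax = 1 →
    stb_vorbis.next_seg s.mem (u.reg .rdi).toNat = 0 ∧
    (stb_vorbis.end_seg_with_known_loc s.mem (u.reg .rdi).toNat = -2 ∨
      (0 ≤ stb_vorbis.end_seg_with_known_loc s.mem (u.reg .rdi).toNat ∧
        stb_vorbis.end_seg_with_known_loc s.mem (u.reg .rdi).toNat < stb_vorbis.segment_count s.mem (u.reg .rdi).toNat))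
  failed : s.reg .rax = 0 →
    stb_vorbis.next_seg s.mem (u.reg .rdi).toNat = stb_vorbis.next_seg u.mem (u.reg .rdi).toNat

/-- The goal of every segment: from `s` the machine reaches the state after the function's `ret`. -/
abbrev SpncDone (Lay : Layout) (μ : Microarch) (u₀ : State) (others : List Obj) (frames : List (Nat × FrameLayout))
    (Blk : Block → Prop) (len : Nat) (u : State) (ret : Word) (s : State) : Prop :=
  ReachVia Lay μ Vorbis.WayInv s
    (Returned (Vorbis.conv u₀) (Vorbis.Spec.start_page_no_capturepattern.spec others frames Blk len) u ret)

/-- `next_seg` reads the same when its four bytes do. -/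
theorem ns_of_eqOn {mem mem' : Mem} {f : Nat} (hf : f + 1808 ≤ 2 ^ 64)
    (h : Mem.EqOn (f + 1752) (f + 1756) mem mem') : stb_vorbis.next_seg mem' f = stb_vorbis.next_seg mem f := by
  simp only [vacc, voff]
  exact h.i32 _ (by omega) (by omega) (by omega)

/-- `stream` reads the same when its eight bytes do. -/
theorem stream_of_eqOn {mem mem' : Mem} {f : Nat} (hf : f + 1808 ≤ 2 ^ 64)
    (h : Mem.EqOn (f + 48) (f + 56) mem mem') : stb_vorbis.stream mem' f = stb_vorbis.stream mem f := by
  simp only [vacc, voff]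
  exact h.u64 _ (by omega) (by omega) (by omega)

/-- `segment_count` reads the same when its four bytes do. -/
theorem sc_of_eqOn {mem mem' : Mem} {f : Nat} (hf : f + 1808 ≤ 2 ^ 64)
    (h : Mem.EqOn (f + 1488) (f + 1492) mem mem') :
    stb_vorbis.segment_count mem' f = stb_vorbis.segment_count mem f := by
  simp only [vacc, voff]
  exact h.i32 _ (by omega) (by omega) (by omega)

/-- `end_seg_with_known_loc` reads the same when its four bytes do. -/
theorem es_of_eqOn {mem mem' : Mem} {f : Nat} (hf : f + 1808 ≤ 2 ^ 64)
    (h : Mem.EqOn (f + 1776) (f + 1780) mem mem') :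
    stb_vorbis.end_seg_with_known_loc mem' f = stb_vorbis.end_seg_with_known_loc mem f := by
  simp only [vacc, voff]
  exact h.i32 _ (by omega) (by omega) (by omega)

/-- A field address as the walker writes it (`rbx + const`) is the `addr` of the number. -/
theorem fieldWord (w : Word) (k : Nat) (x : Word) (hx : x = UInt64.ofNat k) : w + x = addr (w.toNat + k) := by
  subst hx
  rw [← addr_add, addr_toNat]

variable {Lay : Layout} {μ : Microarch} {u₀ : State} {others : List Obj} {frames : List (Nat × FrameLayout)}
  {Blk : Block → Prop} {len : Nat} {u : State} {ret : Word}

/-- The shadow clause at a callee's entry: entered with `rsp − 48` (five pushes and the return address). -/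
theorem callee_shadow (N : Ent Lay others frames Blk len u ret) {s1 : State} (hun : ShadowUntouched u.mem s1.mem)
    (hrsp : s1.reg .rsp = u.reg .rsp - 48) : ShadowPre others frames s1 := by
  have hroom := N.room
  have hal := N.align
  have e : (s1.reg .rsp).toNat = (u.reg .rsp).toNat - 48 := by
    rw [hrsp]
    u_omega
  exact N.pre.shadow.callee hun (by omega) (by omega) (by omega)

/-- The precondition of get8 / get32 at the call: the shadow clause, `rdi = f`, `Bits` in the memory of the call. -/
theorem callee_pre (N : Ent Lay others frames Blk len u ret) {s1 : State} (hun : ShadowUntouched u.mem s1.mem)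
    (hrsp : s1.reg .rsp = u.reg .rsp - 48) (hrdi : s1.reg .rdi = u.reg .rdi)
    (hb : Bits Blk len s1.mem (u.reg .rdi).toNat) : ReaderPre others frames Blk len s1 :=
  N.pre.again (callee_shadow N hun hrsp) hrdi hb

/-- **The machine-level invariant one segment further**: between `s` and `s2` every store went below the six stack slots or
into a window of `*f` of the contract's footprint. -/
theorem Frm.step (N : Ent Lay others frames Blk len u ret) {s s2 : State} (F : Frm u₀ u s ret)
    (hs : Mem.SameExcept [⟨(u.reg .rsp).toNat - 176, (u.reg .rsp).toNat - 40⟩,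
      ⟨(u.reg .rdi).toNat + 48, (u.reg .rdi).toNat + 56⟩, ⟨(u.reg .rdi).toNat + 84, (u.reg .rdi).toNat + 96⟩,
      ⟨(u.reg .rdi).toNat + 136, (u.reg .rdi).toNat + 144⟩, ⟨(u.reg .rdi).toNat + 1484, (u.reg .rdi).toNat + 1748⟩,
      ⟨(u.reg .rdi).toNat + 1752, (u.reg .rdi).toNat + 1756⟩, ⟨(u.reg .rdi).toNat + 1776, (u.reg .rdi).toNat + 1784⟩]
      s.mem s2.mem)
    (hrbx : s2.reg .rbx = u.reg .rdi) (hrsp : s2.reg .rsp = u.reg .rsp - 40)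
    (hkept : RegsKept [.rdi, .rbx, .rsp, .rax, .rdx, .rcx, .rsi, .r8, .r9, .r10, .r11, .r16, .r17, .r18, .r19, .r20, .r21,
      .r22, .r23, .r24, .r25, .r26, .r27, .r28, .r29, .r30, .r31, .rbp, .r12, .r13, .r14] u s2)
    (hcode : Mem.EqOn Vorbis.L.textLo Vorbis.L.textHi u₀.mem s2.mem) (hdf : s2.flags .df = false)
    (hmx : s2.mxcsr &&& 0x1F80 = 0x1F80) : Frm u₀ u s2 ret := by
  have hw := N.pre.where_obj
  have hroom := N.room
  have htop := N.top
  have hsame := F.same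
  have hun : Mem.EqOn 0xC00000 0xE00000 u.mem s.mem := F.untouched
  refine ⟨hrbx, hrsp, hkept, hcode, ?_, ?_, ?_, ?_, ?_, ?_, ?_, ?_, hdf, hmx⟩
  · u_same
  · unfold Asan.ShadowUntouched
    u_eqon
  · u_frame F.slot0
  · u_frame F.slot1
  · u_frame F.slot2
  · u_frame F.slot3
  · u_frame F.slot4
  · u_frame F.slot5

/-- **The invariant one segment further**: as `Frm.step`, and no store went to `next_seg`. -/
theorem SpncMid.step (N : Ent Lay others frames Blk len u ret) {s s2 : State} (M : SpncMid Blk len u₀ u s ret)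
    (hs : Mem.SameExcept [⟨(u.reg .rsp).toNat - 176, (u.reg .rsp).toNat - 40⟩,
      ⟨(u.reg .rdi).toNat + 48, (u.reg .rdi).toNat + 56⟩, ⟨(u.reg .rdi).toNat + 84, (u.reg .rdi).toNat + 96⟩,
      ⟨(u.reg .rdi).toNat + 136, (u.reg .rdi).toNat + 144⟩, ⟨(u.reg .rdi).toNat + 1484, (u.reg .rdi).toNat + 1748⟩,
      ⟨(u.reg .rdi).toNat + 1776, (u.reg .rdi).toNat + 1784⟩] s.mem s2.mem)
    (hrbx : s2.reg .rbx = u.reg .rdi) (hrsp : s2.reg .rsp = u.reg .rsp - 40)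
    (hkept : RegsKept [.rdi, .rbx, .rsp, .rax, .rdx, .rcx, .rsi, .r8, .r9, .r10, .r11, .r16, .r17, .r18, .r19, .r20, .r21,
      .r22, .r23, .r24, .r25, .r26, .r27, .r28, .r29, .r30, .r31, .rbp, .r12, .r13, .r14] u s2)
    (hcode : Mem.EqOn Vorbis.L.textLo Vorbis.L.textHi u₀.mem s2.mem) (hdf : s2.flags .df = false)
    (hmx : s2.mxcsr &&& 0x1F80 = 0x1F80) (hb : Bits Blk len s2.mem (u.reg .rdi).toNat)
    (hst : stb_vorbis.stream s.mem (u.reg .rdi).toNat ≤ stb_vorbis.stream s2.mem (u.reg .rdi).toNat) :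
    SpncMid Blk len u₀ u s2 ret := by
  have hw := N.pre.where_obj
  have hroom := N.room
  have htop := N.top
  refine ⟨Frm.step N M.frm ?_ hrbx hrsp hkept hcode hdf hmx, hb, ?_, Nat.le_trans M.st hst⟩
  · u_same
  · rw [← M.ns]
    apply ns_of_eqOn (by omega)
    u_eqon

/-- `Bits` over the push of a call's return address (at `rsp − 48`: off `*f`). -/
theorem bits_call (N : Ent Lay others frames Blk len u ret) {m : Mem} (hb : Bits Blk len m (u.reg .rdi).toNat) (v : Nat) :
    Bits Blk len (m.writeLE (u.reg .rsp - 48) 8 v) (u.reg .rdi).toNat := by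
  have hw := N.pre.where_obj
  have hroom := N.room
  have htop := N.top
  have e : (u.reg .rsp - 48).toNat = (u.reg .rsp).toNat - 48 := by u_omega
  exact (Reader.store_off_obj hb _ 8 v (by omega) (by omega)).1.bits

/-- **What the function establishes about `end_seg_with_known_loc`** (the `started` clause of the post): `−2`, or an index
below `segment_count`. -/
def EndSeg (mem : Mem) (f : Nat) : Prop :=
  stb_vorbis.end_seg_with_known_loc mem f = -2 ∨
    (0 ≤ stb_vorbis.end_seg_with_known_loc mem f ∧
      stb_vorbis.end_seg_with_known_loc mem f < stb_vorbis.segment_count mem f)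

/-- `EndSeg` reads two fields only. -/
theorem EndSeg.of_eqOn {mem mem' : Mem} {f : Nat} (h : EndSeg mem f) (hf : f + 1808 ≤ 2 ^ 64)
    (h1 : Mem.EqOn (f + 1776) (f + 1780) mem mem') (h2 : Mem.EqOn (f + 1488) (f + 1492) mem mem') : EndSeg mem' f := by
  unfold EndSeg
  rw [es_of_eqOn hf h1, sc_of_eqOn hf h2]
  exact h

/-- A zero-extended byte is below 256. -/
theorem zext8_lt (x : BitVec 8) : (BitVec.zeroExtend 32 x).toNat < 256 := by
  have := x.isLt
  simp only [BitVec.truncate_eq_setWidth, BitVec.toNat_setWidth]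
  omega

/-- The signed reading of a small 32-bit value is the value. -/
theorem toInt_small (b : BitVec 32) (h : b.toNat < 256) : b.toInt = (b.toNat : Int) := by
  rw [BitVec.toInt_eq_toNat_cond]
  split
  · rfl
  · omega

/-- The `int` argument in a register that holds a small 32-bit value. -/
theorem argInt_small (b : BitVec 32) (h : b.toNat < 256) : argInt (Word.ofBV b) = (b.toNat : Int) := by
  rw [argInt_def, Vorbis.toNat_ofBV32]
  have := sint32_cases (b.toNat % 2 ^ 32)
  omega

/-- **The load of `segment_count`** (`mov eax, [rbx + 0x5d0]`) as the walker reads it: a number `c ≤ 255` (N1), and the typed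
field is that number. Give `.1` to the walk as a rewrite rule. -/
theorem sc_read {mem : Mem} (w : Word) (hb : Bits Blk len mem w.toNat) :
    ∃ c : Nat, mem.readLE (w + 1488) 4 = c ∧ c ≤ 255 ∧ stb_vorbis.segment_count mem w.toNat = (c : Int) := by
  have hN1 := hb.N1
  have ea : w + 1488 = addr (w.toNat + 1488) := fieldWord _ 1488 _ rfl
  have hc := Mem.i32_cases mem (w.toNat + 1488)
  simp only [vacc, voff] at hN1 ⊢
  rw [ea]
  refine ⟨_, rfl, ?_, ?_⟩
  · show mem.u32 (w.toNat + 1488) ≤ 255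
    omega
  · show mem.i32 (w.toNat + 1488) = (mem.u32 (w.toNat + 1488) : Int)
    omega

/-- `lea ebp, [rax − 1]` on `segment_count ≤ 255` (the start of the loop of line 1502): the signed value is `c − 1 ≥ −1`. -/
theorem dec_toInt : ∀ c : Nat, c ≤ 255 →
    (BitVec.setWidth 32 (Word.ofBV (BitVec.ofNat 32 c) - 1).toBitVec).toInt = (c : Int) - 1 := by
  decide

/-- The value `−2` of `end_seg_with_known_loc`, as the store `mov DWORD PTR [rbx+0x6f0], 0xfffffffe` leaves it. -/
theorem endSeg_stored (mem : Mem) (w : Word) : EndSeg (mem.writeLE (w + 1776) 4 4294967294) w.toNat := by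
  have ea : w + 1776 = addr (w.toNat + 1776) := fieldWord _ 1776 _ rfl
  left
  simp only [vacc, voff]
  rw [ea, Mem.i32_writeLE_same]
  decide

/-- `test ebp, ebp ; js` not taken: the `int` is non-negative, and its signed and unsigned readings agree. -/
theorem msb_false (x : BitVec 32) (h : x.msb = false) : x.toInt = (x.toNat : Int) ∧ x.toNat < 2 ^ 31 := by
  have h1 := BitVec.toInt_eq_msb_cond x
  have h2 := BitVec.msb_eq_decide x
  rw [h] at h1 h2
  simp only [Bool.false_eq_true, if_false] at h1
  have h3 : ¬ (2 ^ (32 - 1) ≤ x.toNat) := by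
    intro hc
    have : decide (2 ^ (32 - 1) ≤ x.toNat) = true := decide_eq_true hc
    rw [this] at h2
    exact absurd h2 (by decide)
  constructor
  · exact h1
  · omega

/-- `test ebp, ebp ; js` taken: the `int` is negative. -/
theorem msb_true (x : BitVec 32) (h : x.msb = true) : x.toInt < 0 := by
  have h1 := BitVec.toInt_eq_msb_cond x
  rw [h] at h1
  simp only [if_true] at h1
  have := x.isLt
  omega

/-- `sub ebp, 1` on a non-negative `int`: no wrap. -/
theorem sub_one_toInt (x : BitVec 32) (h : x.msb = false) : (x - 1#32).toInt = x.toInt - 1 := by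
  obtain ⟨h1, h2⟩ := msb_false x h
  have h3 := BitVec.toInt_eq_toNat_cond (x - 1#32)
  have h4 : (x - 1#32).toNat = (2 ^ 32 - 1 + x.toNat) % 2 ^ 32 := by
    rw [BitVec.toNat_sub]
    rfl
  rw [h4] at h3
  rw [h3, h1]
  split <;> omega

/-- `add ebp, 1` on an `int` below 255: no wrap. -/
theorem add_one_toInt (x : BitVec 32) (hx : x.toNat < 255) :
    (x + 1#32).msb = false ∧ (x + 1#32).toNat = x.toNat + 1 := by
  have h4 : (x + 1#32).toNat = (x.toNat + 1) % 2 ^ 32 := by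
    rw [BitVec.toNat_add]
    rfl
  have h5 : (x + 1#32).toNat = x.toNat + 1 := by
    rw [h4]
    omega
  refine ⟨?_, h5⟩
  rw [BitVec.msb_eq_decide, h5]
  simp only [decide_eq_false_iff_not, Nat.not_le]
  omega

/-- The value of `end_seg_with_known_loc` after `mov DWORD PTR [rbx+0x6f0], ebp`. -/
theorem endSeg_index (mem : Mem) (w : Word) (x : BitVec 32) :
    stb_vorbis.end_seg_with_known_loc (mem.writeLE (w + 1776) 4 x.toNat) w.toNat = x.toInt := by
  have ea : w + 1776 = addr (w.toNat + 1776) := fieldWord _ 1776 _ rfl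
  simp only [vacc, voff]
  rw [ea]
  exact Mem.i32_writeLE_same_bv mem _ x

/-- `segment_count ≤ 255` loaded into `eax`: its signed reading (the `cmp eax, ebp ; jg` of line 1514) is the number. -/
theorem ofNat_toInt : ∀ c : Nat, c ≤ 255 → (BitVec.ofNat 32 c).toInt = (c : Int) := by
  decide

end Vorbis.Spec.start_page_no_capturepattern
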